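-- pv_equiv track=rewrite | github.com/A5jadAli/mit-winter-contest | adv_round/number_reduction.py | can_reach_one
-- ===== SOURCE A (Python) =====
-- def can_reach_one(n, memo=None):
--     """Check if number n can reach 1 using the given operations."""
--     if memo is None:
--         memo = {}
--
--     if n in memo:
--         return memo[n]
--
--     if n == 1:
--         return True
--
--     digits = [d for d in get_digits(n) if d > 1]
--
--     for digit in digits:
--         if n % digit == 0:
--             new_n = n // digit
--             if can_reach_one(new_n, memo):
--                 memo[n] = True
--                 return True
--
--     memo[n] = False
--     return False
--
-- def get_digits(n):
--     """Get list of digits in number n."""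
--     return [int(d) for d in str(n)]
-- ===== SOURCE B (Python) =====
-- def can_reach_one(n, memo=None):
--     """Check if number n can reach 1 using the given operations.
--
--     Iterative DFS with an explicit frame stack instead of recursion; honors
--     and populates a caller-supplied memo exactly like the recursive version.
--     """
--     if memo is None:
--         memo = {}
--     frames = [(n, None)]
--     ret = False
--     while frames:
--         v, pending = frames.pop()
--         if pending is None:
--             if v in memo:
--                 ret = memo[v]
--                 continue
--             if v == 1:
--                 ret = True
--                 continue
--             pending = [v // d for d in (int(c) for c in str(v)) if d > 1 and v % d == 0]
--         elif ret:
--             memo[v] = True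
--             continue
--         if pending:
--             frames.append((v, pending[1:]))
--             frames.append((pending[0], None))
--         else:
--             memo[v] = False
--             ret = False
--     return ret
-- ===== Notes on version B (the rewrite author's own statement) =====
-- stated objective: alternative
-- what changed: The memoized recursion is replaced by an iterative depth-first search over an explicit stack of (value, pending-successors) frames with a result register; the caller-supplied memo is consulted and populated exactly as in A.
import Mathlib
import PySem

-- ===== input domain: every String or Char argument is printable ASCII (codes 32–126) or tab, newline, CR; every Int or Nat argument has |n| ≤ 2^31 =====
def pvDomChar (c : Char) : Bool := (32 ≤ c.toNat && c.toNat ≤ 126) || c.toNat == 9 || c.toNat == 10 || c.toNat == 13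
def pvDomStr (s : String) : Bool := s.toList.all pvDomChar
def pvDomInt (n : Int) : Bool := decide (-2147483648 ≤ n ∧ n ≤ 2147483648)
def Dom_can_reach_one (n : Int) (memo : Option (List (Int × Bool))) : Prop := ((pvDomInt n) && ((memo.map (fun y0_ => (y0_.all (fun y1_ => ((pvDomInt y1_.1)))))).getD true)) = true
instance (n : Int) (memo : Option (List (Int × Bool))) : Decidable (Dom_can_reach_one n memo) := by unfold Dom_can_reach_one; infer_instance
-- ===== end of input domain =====

-- B replaces the memoized recursion by an iterative DFS over an explicit frame stack;
-- both versions mutate the caller-supplied memo identically, and the theorems are about the return value.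

-- ===== PORT A =====
-- input marshalling: the Python `memo` argument (dict or None) as a PySem.Dict
def memoDictA (memo : Option (List (Int × Bool))) : PySem.Dict Int Bool :=
  match memo with
  | none => PySem.Dict.empty
  | some l => PySem.Dict.ofList l

-- digits = [d for d in [int(c) for c in str(n)] if d > 1]; the per-char int() is ported with
-- filterMap, exact for n ≥ 0 (for n < 0 Python raises ValueError at '-'; Pre_ excludes those inputs)
def digitsA (v : Int) : List Int :=
  ((PySem.Int.toStr v).toList.filterMap (fun c => PySem.Int.ofStr? (String.ofList [c]))).filter
    (fun d => decide (1 < d))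

theorem digitsA_zero_nil : digitsA 0 = [] := by decide

theorem digitsA_mem_one_lt {v d : Int} (h : d ∈ digitsA v) : 1 < d := by
  have := List.of_mem_filter h
  simpa using this

theorem succ_natAbs_lt {v d : Int} (hd1 : 1 < d) (hm : PySem.Int.mod v d = 0) (hv : v ≠ 0) :
    (PySem.Int.floordiv v d).natAbs < v.natAbs := by
  have hdvd : d ∣ v := (PySem.Int.mod_eq_zero_iff_dvd v d).mp hm
  obtain ⟨c, hc⟩ := hdvd
  have hdpos : (0:Int) < d := by omega
  rw [PySem.Int.floordiv_eq_ediv_of_pos hdpos, hc, Int.mul_ediv_cancel_left _ (by omega)]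
  have hc0 : c ≠ 0 := by rintro rfl; simp at hc; omega
  have h1 : 1 ≤ c.natAbs := Int.natAbs_pos.mpr hc0
  have h2 : 2 ≤ d.natAbs := by omega
  have hva : v.natAbs = d.natAbs * c.natAbs := by rw [hc, Int.natAbs_mul]
  have h3 : 2 * c.natAbs ≤ d.natAbs * c.natAbs := Nat.mul_le_mul_right _ h2
  omega

theorem digitsA_step {v d : Int} (hd : d ∈ digitsA v) (hm : PySem.Int.mod v d = 0) :
    (PySem.Int.floordiv v d).natAbs < v.natAbs := by
  have hv : v ≠ 0 := by
    rintro rfl; rw [digitsA_zero_nil] at hd; exact absurd hd (List.not_mem_nil)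
  exact succ_natAbs_lt (digitsA_mem_one_lt hd) hm hv

mutual
-- can_reach_one body: memo lookup, n == 1, then the for-loop over the filtered digits
def solveA (v : Int) (memo : PySem.Dict Int Bool) : Bool × PySem.Dict Int Bool :=
  match memo.get? v with
  | some b => (b, memo)
  | none =>
    if v = 1 then (true, memo)
    else loopA v (digitsA v).attach memo
termination_by (v.natAbs, (digitsA v).length + 1)
decreasing_by simp [Prod.lex_iff, List.length_attach]

-- the for-loop; digits carried with their membership proof (for termination only)
def loopA (v : Int) (ds : List {d : Int // d ∈ digitsA v}) (memo : PySem.Dict Int Bool) :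
    Bool × PySem.Dict Int Bool :=
  match ds with
  | [] => (false, memo.insert v false)
  | d :: rest =>
    if hm : PySem.Int.mod v d.1 = 0 then
      let r := solveA (PySem.Int.floordiv v d.1) memo
      if r.1 then (true, r.2.insert v true)
      else loopA v rest r.2
    else loopA v rest memo
termination_by (v.natAbs, ds.length)
decreasing_by
  · exact Prod.Lex.left _ _ (digitsA_step d.2 hm)
  · simp [Prod.lex_iff]
  · simp [Prod.lex_iff]
end

def can_reach_one (n : Int) (memo : Option (List (Int × Bool))) : Bool :=
  (solveA n (memoDictA memo)).1

-- ===== PORT B =====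
-- input marshalling for B (same conversion, kept separate from A's helper)
def memoDictB (memo : Option (List (Int × Bool))) : PySem.Dict Int Bool :=
  match memo with
  | none => PySem.Dict.empty
  | some l => PySem.Dict.ofList l

-- pending = [v // d for d in (int(c) for c in str(v)) if d > 1 and v % d == 0]
def succB (v : Int) : List Int :=
  (((PySem.Int.toStr v).toList.filterMap (fun c => PySem.Int.ofStr? (String.ofList [c]))).filter
      (fun d => decide (1 < d) && decide (PySem.Int.mod v d = 0))).map
    (fun d => PySem.Int.floordiv v d)

theorem succB_zero_nil : succB 0 = [] := by decide

theorem succB_mem_natAbs_lt {v c : Int} (h : c ∈ succB v) : c.natAbs < v.natAbs := by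
  have hv : v ≠ 0 := by
    rintro rfl; rw [succB_zero_nil] at h; exact absurd h List.not_mem_nil
  obtain ⟨d, hd, rfl⟩ := List.mem_map.mp h
  have hf := List.of_mem_filter hd
  have hd1 : (1:Int) < d := by simpa using (Bool.and_elim_left hf)
  have hm : PySem.Int.mod v d = 0 := by simpa using (Bool.and_elim_right hf)
  exact succ_natAbs_lt hd1 hm hv

-- weight of a value: size of its (unmemoized) search tree; used only for termination of runB
def W (v : Int) : Nat :=
  1 + ((succB v).attach.map (fun c => 2 + W c.1)).sum
termination_by v.natAbs
decreasing_by exact succB_mem_natAbs_lt c.2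

def frameW : Int × Option (List Int) → Nat
  | (v, none) => 1 + W v
  | (_, some p) => 1 + (p.map (fun c => 2 + W c)).sum

theorem W_eq (v : Int) : W v = 1 + ((succB v).map (fun c => 2 + W c)).sum := by
  rw [W]; simp

-- the while loop: frames is the stack, ret the result register
def runB (frames : List (Int × Option (List Int))) (memo : PySem.Dict Int Bool) (ret : Bool) :
    Bool :=
  match frames with
  | [] => ret
  | (v, none) :: rest =>
    match memo.get? v with
    | some b => runB rest memo b
    | none =>
      if v = 1 then runB rest memo true
      else
        match hs : succB v with
        | [] => runB rest (memo.insert v false) false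
        | c :: tail => runB ((c, none) :: (v, some tail) :: rest) memo ret
  | (v, some pending) :: rest =>
    if ret then runB rest (memo.insert v true) true
    else
      match pending with
      | [] => runB rest (memo.insert v false) false
      | c :: tail => runB ((c, none) :: (v, some tail) :: rest) memo ret
termination_by (frames.map frameW).sum
decreasing_by
  all_goals simp only [List.map_cons, List.sum_cons, frameW]
  all_goals try omega
  all_goals (rename_i hs; rw [W_eq v, hs]; simp only [List.map_cons, List.sum_cons]; omega)

def can_reach_one_alt (n : Int) (memo : Option (List (Int × Bool))) : Bool :=
  runB [(n, none)] (memoDictB memo) false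

-- ===== PRECONDITION & SPEC =====
-- Pre_ excludes exactly the inputs where the Python A raises ValueError (int('-')):
-- n < 0 and n not a key of the supplied memo.  (B raises there too.)
def Pre_can_reach_one (n : Int) (memo : Option (List (Int × Bool))) : Prop :=
  0 ≤ n ∨ n ∈ (memo.getD []).map Prod.fst
instance (n : Int) (memo : Option (List (Int × Bool))) : Decidable (Pre_can_reach_one n memo) := by
  unfold Pre_can_reach_one; infer_instance

def pvWitness_can_reach_one : Int × (Option (List (Int × Bool))) := (36, none)

def Spec_can_reach_one (n : Int) (memo : Option (List (Int × Bool))) (out : Bool) : Prop := out = can_reach_one_alt n memo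
instance (n : Int) (memo : Option (List (Int × Bool))) (out : Bool) : Decidable (Spec_can_reach_one n memo out) := by unfold Spec_can_reach_one; infer_instance

-- ===== CLAIM (what is proved, stated in full; the proofs are below) =====
def Claim_equal_can_reach_one : Prop := ∀ (n : Int) (memo : Option (List (Int × Bool))), Dom_can_reach_one n memo → Pre_can_reach_one n memo → Spec_can_reach_one n memo (can_reach_one n memo)

-- ===== LEMMAS AND PROOFS =====

-- successors contributed by the remaining digits ds of v
def mkS (v : Int) (ds : List Int) : List Int :=
  (ds.filter (fun d => decide (PySem.Int.mod v d = 0))).map (fun d => PySem.Int.floordiv v d)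

theorem succB_eq_mkS (v : Int) : succB v = mkS v (digitsA v) := by
  simp [succB, mkS, digitsA, List.filter_filter, Bool.and_comm]

theorem inner2 (v : Int)
    (IH : ∀ c : Int, c.natAbs < v.natAbs → ∀ rest memo ret,
      runB ((c, none) :: rest) memo ret = runB rest (solveA c memo).2 (solveA c memo).1) :
    ∀ (ds : List {d : Int // d ∈ digitsA v}) (rest : List (Int × Option (List Int)))
      (memo : PySem.Dict Int Bool) (ret : Bool),
    (match mkS v (ds.map Subtype.val) with
     | [] => runB rest (memo.insert v false) false
     | c :: tail => runB ((c, none) :: (v, some tail) :: rest) memo ret)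
    = runB rest (loopA v ds memo).2 (loopA v ds memo).1 := by
  intro ds
  induction ds with
  | nil =>
    intro rest memo ret
    simp [mkS, loopA]
  | cons d ds' ihds =>
    intro rest memo ret
    by_cases hm : PySem.Int.mod v d.1 = 0
    · have hstep := digitsA_step d.2 hm
      have hmk : mkS v ((d :: ds').map Subtype.val)
          = PySem.Int.floordiv v d.1 :: mkS v (ds'.map Subtype.val) := by
        simp [mkS, hm]
      rw [hmk]
      show runB ((PySem.Int.floordiv v d.1, none) :: (v, some (mkS v (ds'.map Subtype.val))) :: rest) memo ret = _
      rw [IH _ hstep]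
      rw [loopA]
      simp only [hm, dif_pos]
      cases hb : (solveA (PySem.Int.floordiv v d.1) memo).1
      · rw [runB.eq_def]
        simp only [Bool.false_eq_true, if_false]
        have h2 := ihds rest (solveA (PySem.Int.floordiv v d.1) memo).2 false
        cases hsv : mkS v (ds'.map Subtype.val) with
        | nil => rw [hsv] at h2; simpa using h2
        | cons c tail => rw [hsv] at h2; simpa using h2
      · rw [runB.eq_def]
        simp
    · have hmk : mkS v ((d :: ds').map Subtype.val) = mkS v (ds'.map Subtype.val) := by
        simp [mkS, hm]
      rw [hmk, loopA]
      simp only [hm, dif_neg, not_false_iff]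
      exact ihds rest memo ret

theorem simAux : ∀ (N : Nat) (v : Int), v.natAbs < N →
    ∀ (rest : List (Int × Option (List Int))) (memo : PySem.Dict Int Bool) (ret : Bool),
    runB ((v, none) :: rest) memo ret = runB rest (solveA v memo).2 (solveA v memo).1 := by
  intro N
  induction N with
  | zero => intro v hv; exact absurd hv (Nat.not_lt_zero _)
  | succ N ih =>
    intro v hv rest memo ret
    have IH : ∀ c : Int, c.natAbs < v.natAbs → ∀ rest memo ret,
        runB ((c, none) :: rest) memo ret = runB rest (solveA c memo).2 (solveA c memo).1 :=
      fun c hc => ih c (by omega)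
    rw [solveA]
    cases hg : memo.get? v with
    | some b =>
      rw [runB]; simp [hg]
    | none =>
      by_cases h1 : v = 1
      · subst h1; rw [runB]; simp [hg]
      · have h := inner2 v IH (digitsA v).attach rest memo ret
        rw [List.attach_map_subtype_val, ← succB_eq_mkS] at h
        rw [runB]
        simp only [hg, h1, if_false]
        cases hsv : succB v with
        | nil => rw [hsv] at h; simpa using h
        | cons c tail => rw [hsv] at h; simpa using h

theorem ports_agree (n : Int) (memo : Option (List (Int × Bool))) :
    can_reach_one n memo = can_reach_one_alt n memo := by
  have hmm : memoDictB memo = memoDictA memo := rfl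
  rw [can_reach_one, can_reach_one_alt, hmm,
    simAux (n.natAbs + 1) n (Nat.lt_succ_self _) [] (memoDictA memo) false, runB]

-- ===== VERDICT (by name: the statement is the Claim_ definition above) =====
theorem can_reach_one_spec : Claim_equal_can_reach_one := by
  intro n memo _ _
  unfold Spec_can_reach_one
  exact ports_agree n memo
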